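-- pv_equiv track=rewrite | github.com/monkeyman51/VSE_PipeCleaner_2 | pipe_cleaner/src/azure_devops/demo_blocked.py | get_monthly_data
-- ===== SOURCE A (Python) =====
-- def get_monthly_data(commodity_types: dict):
--     month_data: dict = {}
--     for pair in commodity_types:
--         month = pair[0]
--         commodity_type: str = pair[1]
--
--         if month not in month_data:
--             month_data[month]: dict = {}
--             month_data[month][commodity_type] = 1
--
--         else:
--             if commodity_type not in month_data[month]:
--                 month_data[month][commodity_type] = 1
--             else:
--                 month_data[month][commodity_type] += 1
--
--     return month_data
-- ===== SOURCE B (Python) =====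
-- from collections import Counter
--
--
-- def get_monthly_data(commodity_types: dict):
--     groups: dict = {}
--     for pair in commodity_types:
--         groups.setdefault(pair[0], []).append(pair[1])
--     return {month: dict(Counter(types)) for month, types in groups.items()}
-- ===== Notes on version B (the rewrite author's own statement) =====
-- stated objective: idiomatic
-- what changed: Replaced the inline three-way branch that increments nested dict counts with a two-phase group-then-count: one pass builds month -> list of types via setdefault/append, then each month's list is counted with collections.Counter.
import Mathlib
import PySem

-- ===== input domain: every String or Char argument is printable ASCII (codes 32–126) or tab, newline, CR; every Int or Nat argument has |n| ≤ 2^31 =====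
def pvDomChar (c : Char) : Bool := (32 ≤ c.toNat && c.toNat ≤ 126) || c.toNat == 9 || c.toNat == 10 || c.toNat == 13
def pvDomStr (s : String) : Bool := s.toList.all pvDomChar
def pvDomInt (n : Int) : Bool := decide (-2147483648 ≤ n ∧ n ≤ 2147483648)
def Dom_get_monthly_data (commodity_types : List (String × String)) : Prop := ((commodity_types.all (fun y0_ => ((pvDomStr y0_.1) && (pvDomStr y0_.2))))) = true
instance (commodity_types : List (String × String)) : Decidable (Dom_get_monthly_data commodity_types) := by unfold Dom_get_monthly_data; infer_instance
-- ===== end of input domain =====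

-- B replaces A's inline nested-dict increment branches by a two-phase group-then-count
-- (month -> list of types, then a Counter per month); same cost, different decomposition.


-- ===== PORT A =====
-- literal port: one pass; three branches (new month / new type / increment)
def get_monthly_data (commodity_types : List (String × String)) : List (String × List (String × Int)) :=
  let month_data : PySem.Dict String (PySem.Dict String Int) :=
    commodity_types.foldl (fun month_data pair =>
      let month := pair.1
      let commodity_type := pair.2
      if month_data.contains month = false then
        month_data.insert month ((PySem.Dict.empty).insert commodity_type 1)
      else
        let inner := month_data.getD month PySem.Dict.empty
        if inner.contains commodity_type = false then
          month_data.insert month (inner.insert commodity_type 1)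
        else
          month_data.insert month (inner.insert commodity_type (inner.getD commodity_type 0 + 1)))
      PySem.Dict.empty
  month_data.items.map (fun p => (p.1, p.2.items))

-- ===== PORT B =====
-- literal port of Source B: group month -> list of types (setdefault/append), then Counter per month
def get_monthly_data_alt (commodity_types : List (String × String)) : List (String × List (String × Int)) :=
  let groups : PySem.Dict String (List String) :=
    commodity_types.foldl (fun d pair => d.modify pair.1 [] (· ++ [pair.2])) PySem.Dict.empty
  groups.items.map (fun p => (p.1, (PySem.Dict.counter p.2).items))

-- ===== PRECONDITION & SPEC =====
def Spec_get_monthly_data (commodity_types : List (String × String)) (out : List (String × List (String × Int))) : Prop := out = get_monthly_data_alt commodity_types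
instance (commodity_types : List (String × String)) (out : List (String × List (String × Int))) : Decidable (Spec_get_monthly_data commodity_types out) := by unfold Spec_get_monthly_data; infer_instance

-- ===== CLAIM (what is proved, stated in full; the proofs are below) =====
def Claim_equal_get_monthly_data : Prop := ∀ (commodity_types : List (String × String)), Dom_get_monthly_data commodity_types → Spec_get_monthly_data commodity_types (get_monthly_data commodity_types)

-- ===== LEMMAS AND PROOFS =====

-- map each grouped list to its counter (the shape shared by both sides' final states)
def pvCount (g : PySem.Dict String (List String)) : PySem.Dict String (PySem.Dict String Int) :=
  PySem.Dict.mk (g.items.map (fun p => (p.1, PySem.Dict.counter p.2)))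

-- Dict.modify is always an insert of the adjusted value (specific unfolding of PySem's modify)
theorem pv_modify_eq_insert {ν : Type} (d : PySem.Dict String ν) (k : String) (d0 : ν) (f : ν → ν) :
    d.modify k d0 f = d.insert k (f (d.getD k d0)) := by
  simp [PySem.Dict.modify, PySem.Dict.insert, PySem.Dict.getD]

theorem pvCount_keys (g : PySem.Dict String (List String)) : (pvCount g).keys = g.keys := by
  simp [pvCount, PySem.Dict.keys]

theorem pvCount_contains (g : PySem.Dict String (List String)) (m : String) :
    (pvCount g).contains m = g.contains m := by
  simp only [pvCount, PySem.Dict.contains, List.any_map]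
  rfl

theorem pvCount_getD (g : PySem.Dict String (List String)) (m : String)
    (hg : g.keys.Nodup) : (pvCount g).getD m PySem.Dict.empty = PySem.Dict.counter (g.getD m []) := by
  by_cases h : g.contains m = true
  · obtain ⟨v, hv⟩ : ∃ v, g.get? m = some v := Option.isSome_iff_exists.mp (by
      rw [← PySem.Dict.contains_eq_isSome_get?]; exact h)
    have hmem := PySem.Dict.mem_items_of_get?_eq_some g hv
    have hmem' : (m, PySem.Dict.counter v) ∈ (pvCount g).items := by
      simp only [pvCount]
      exact List.mem_map.mpr ⟨(m, v), hmem, rfl⟩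
    rw [PySem.Dict.getD_of_mem_items _ hmem' (by rw [pvCount_keys g]; exact hg) _,
        PySem.Dict.getD_of_get?_eq_some g _ hv]
  · have h' : g.contains m = false := by simpa using h
    rw [PySem.Dict.getD_of_not_contains _ _ (by rw [pvCount_contains]; exact h' : (pvCount g).contains m = false),
        PySem.Dict.getD_of_not_contains _ _ h']
    rfl

-- pvCount commutes with one grouping step
theorem pvCount_step (g : PySem.Dict String (List String)) (m t : String) :
    pvCount (g.modify m [] (· ++ [t]))
      = (pvCount g).insert m (PySem.Dict.counter (g.getD m [] ++ [t])) := by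
  rw [pv_modify_eq_insert]
  apply PySem.Dict.ext
  by_cases h : g.contains m = true
  · rw [show (pvCount g).insert m (PySem.Dict.counter (g.getD m [] ++ [t]))
        = PySem.Dict.mk ((pvCount g).items.map (fun p => if p.1 == m then (m, PySem.Dict.counter (g.getD m [] ++ [t])) else p)) from
      PySem.Dict.ext (PySem.Dict.items_insert_of_contains _ _ (by rw [pvCount_contains]; exact h))]
    simp only [pvCount, PySem.Dict.items_insert_of_contains _ _ h, List.map_map]
    apply List.map_congr_left
    intro p _
    by_cases hp : p.1 = m <;> simp [hp]
  · have h' : g.contains m = false := by simpa using h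
    rw [PySem.Dict.items_insert_of_not_contains _ _ (by rw [pvCount_contains]; exact h')]
    simp only [pvCount, PySem.Dict.items_insert_of_not_contains _ _ h', List.map_append]
    rfl

-- A's three-branch step is a single counter-update step
theorem pv_stepA (md : PySem.Dict String (PySem.Dict String Int)) (m t : String) :
    (if md.contains m = false then
        md.insert m ((PySem.Dict.empty).insert t 1)
      else
        let inner := md.getD m PySem.Dict.empty
        if inner.contains t = false then
          md.insert m (inner.insert t 1)
        else
          md.insert m (inner.insert t (inner.getD t 0 + 1)))
    = md.insert m ((md.getD m PySem.Dict.empty).modify t 0 (· + 1)) := by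
  rw [pv_modify_eq_insert]
  by_cases h : md.contains m = false
  · rw [if_pos h, PySem.Dict.getD_of_not_contains md PySem.Dict.empty h]
    simp [PySem.Dict.getD_empty]
  · rw [if_neg h]
    by_cases h2 : (md.getD m PySem.Dict.empty).contains t = false
    · rw [if_pos h2, PySem.Dict.getD_of_not_contains _ 0 h2]
      norm_num
    · simp only [if_neg h2]

-- keys stay Nodup through one grouping step
theorem pv_step_nodup (g : PySem.Dict String (List String)) (m t : String) (hg : g.keys.Nodup) :
    (g.modify m [] (· ++ [t])).keys.Nodup := by
  have := PySem.Dict.nodup_keys_foldl_modify_key [(m, t)] (fun p : String × String => p.1)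
    ([] : List String) (fun _ p => (· ++ [p.2])) g hg
  simpa using this

-- main invariant: A's fold from pvCount g equals pvCount of B's grouping fold from g
theorem pv_inv (l : List (String × String)) (g : PySem.Dict String (List String)) (hg : g.keys.Nodup) :
    l.foldl (fun md p => md.insert p.1 ((md.getD p.1 PySem.Dict.empty).modify p.2 0 (· + 1))) (pvCount g)
      = pvCount (l.foldl (fun d p => d.modify p.1 [] (· ++ [p.2])) g) := by
  induction l generalizing g with
  | nil => rfl
  | cons p rest ih =>
    simp only [List.foldl_cons]
    rw [show (pvCount g).insert p.1 (((pvCount g).getD p.1 PySem.Dict.empty).modify p.2 0 (· + 1))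
        = pvCount (g.modify p.1 [] (· ++ [p.2])) from by
      rw [pvCount_step g p.1 p.2, pvCount_getD g p.1 hg, pv_modify_eq_insert,
          PySem.Dict.counter_append_singleton, pv_modify_eq_insert]]
    exact ih _ (pv_step_nodup g p.1 p.2 hg)

-- ===== VERDICT (by name: the statement is the Claim_ definition above) =====
theorem get_monthly_data_spec : Claim_equal_get_monthly_data := by
  intro l _
  show get_monthly_data l = get_monthly_data_alt l
  unfold get_monthly_data get_monthly_data_alt
  have hstep : (fun (md : PySem.Dict String (PySem.Dict String Int)) (pair : String × String) =>
      if md.contains pair.1 = false then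
        md.insert pair.1 ((PySem.Dict.empty).insert pair.2 1)
      else
        let inner := md.getD pair.1 PySem.Dict.empty
        if inner.contains pair.2 = false then
          md.insert pair.1 (inner.insert pair.2 1)
        else
          md.insert pair.1 (inner.insert pair.2 (inner.getD pair.2 0 + 1)))
    = fun md pair => md.insert pair.1 ((md.getD pair.1 PySem.Dict.empty).modify pair.2 0 (· + 1)) := by
    funext md pair
    exact pv_stepA md pair.1 pair.2
  simp only [hstep]
  rw [show (PySem.Dict.empty : PySem.Dict String (PySem.Dict String Int)) = pvCount PySem.Dict.empty from rfl,
      pv_inv l PySem.Dict.empty (by simp [PySem.Dict.keys, PySem.Dict.empty])]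
  simp [pvCount, List.map_map, Function.comp]
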